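-- pv_equiv track=rewrite | github.com/JaekyungCho2140/sebastianmk2 | legacy/LY/src/batch_merger.py | find_duplicates_within_batch
-- ===== SOURCE A (Python) =====
-- from typing import Dict, List, Tuple, Optional
--
-- def find_duplicates_within_batch(
--     data_rows: List[List],
--     selected_batches: List[str],
--     batch_row_counts: Dict[str, int]
-- ) -> Dict[str, List[str]]:
--     """
--     배치 내 중복 KEY 검출
--
--     Args:
--         data_rows: 전체 데이터 행 (헤더 제외)
--         selected_batches: 선택된 배치 목록 (정렬됨)
--         batch_row_counts: {배치명: 행 수}
--
--     Returns:
--         {배치명: [중복KEY1, 중복KEY2, ...]}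
--
--     Reference:
--         PRD 섹션 2.4.5
--     """
--     batch_duplicates = {}
--     current_idx = 0
--
--     for batch_name in selected_batches:
--         row_count = batch_row_counts[batch_name]
--         batch_rows = data_rows[current_idx:current_idx + row_count]
--
--         # KEY 중복 검출
--         key_counts = {}
--         for row in batch_rows:
--             if len(row) >= 2:
--                 key = row[1]  # B열 (KEY)
--                 if key:
--                     key_counts[key] = key_counts.get(key, 0) + 1
--
--         # 중복 KEY 추출
--         duplicates = [k for k, count in key_counts.items() if count > 1]
--
--         if duplicates:
--             batch_duplicates[batch_name] = duplicates
--
--         current_idx += row_count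
--
--     return batch_duplicates
-- ===== SOURCE B (Python) =====
-- def find_duplicates_within_batch(data_rows, selected_batches, batch_row_counts):
--     result = {}
--     idx = 0
--     for name in selected_batches:
--         n = batch_row_counts[name]
--         keys = [r[1] for r in data_rows[idx:idx + n] if len(r) >= 2 and r[1]]
--         # extract duplicated keys in first-occurrence order by membership-in-remainder
--         # and removal of all copies; no counting structure is maintained
--         dups = []
--         while keys:
--             k, keys = keys[0], keys[1:]
--             if k in keys:
--                 dups.append(k)
--                 keys = [x for x in keys if x != k]
--         if dups:
--             result[name] = dups
--         idx += n
--     return result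
-- ===== Notes on version B (the rewrite author's own statement) =====
-- stated objective: alternative
-- what changed: Replaces A's per-batch counting dict (build key->count map, then filter items with count>1) by a list-consuming extraction loop: pop the first key, and if it still occurs in the remainder it is a duplicate, emit it and remove all its copies; no counter or count lookup exists anywhere in B.
import Mathlib
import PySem

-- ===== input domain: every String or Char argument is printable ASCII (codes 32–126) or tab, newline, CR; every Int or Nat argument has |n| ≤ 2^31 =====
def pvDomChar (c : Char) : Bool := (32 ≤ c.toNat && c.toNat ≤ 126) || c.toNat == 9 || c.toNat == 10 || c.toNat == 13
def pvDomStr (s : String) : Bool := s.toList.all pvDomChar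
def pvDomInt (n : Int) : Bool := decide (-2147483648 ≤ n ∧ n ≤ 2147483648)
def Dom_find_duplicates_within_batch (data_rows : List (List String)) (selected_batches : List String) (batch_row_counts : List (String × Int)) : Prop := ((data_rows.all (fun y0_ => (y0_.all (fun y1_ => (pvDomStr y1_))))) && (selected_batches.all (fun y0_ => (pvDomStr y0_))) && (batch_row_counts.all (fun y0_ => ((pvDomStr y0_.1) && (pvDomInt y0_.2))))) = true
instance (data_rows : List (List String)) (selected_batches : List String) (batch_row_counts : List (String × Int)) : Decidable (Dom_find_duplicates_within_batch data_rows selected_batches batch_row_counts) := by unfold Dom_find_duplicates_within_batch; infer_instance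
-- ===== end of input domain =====

-- B replaces A's per-batch counting dict by a list-consuming extraction loop (pop a key,
-- membership in the remainder decides duplicate, remove all copies); no counter is maintained.

-- ===== PORT A =====
def find_duplicates_within_batch (data_rows : List (List String)) (selected_batches : List String) (batch_row_counts : List (String × Int)) : List (String × List String) :=
  (selected_batches.foldl (fun (st : PySem.Dict String (List String) × Int) (batch_name : String) =>
    let row_count := (PySem.Dict.mk batch_row_counts).getD batch_name 0
    let batch_rows := PySem.List.slice data_rows (some st.2) (some (st.2 + row_count))
    let key_counts := batch_rows.foldl (fun (d : PySem.Dict String Int) row =>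
        if 2 ≤ row.length then
          let key := PySem.List.pyGetD row 1 ""
          if key ≠ "" then d.insert key (d.getD key 0 + 1) else d
        else d) PySem.Dict.empty
    let duplicates := (key_counts.items.filter (fun p => 1 < p.2)).map Prod.fst
    (if duplicates ≠ [] then st.1.insert batch_name duplicates else st.1, st.2 + row_count))
    (PySem.Dict.empty, 0)).1.items

-- ===== PORT B =====
-- B's inner while loop: consume the key list; a popped key occurring in the remainder is a
-- duplicate; all its copies are then removed from the remainder.
def pvDupKeys (dups : List String) : List String → List String
  | [] => dups
  | k :: rest =>
      if rest.contains k then pvDupKeys (dups ++ [k]) (rest.filter (fun x => !(x == k)))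
      else pvDupKeys dups rest
termination_by l => l.length
decreasing_by
  · exact Nat.lt_succ_of_le (by simpa using List.length_filter_le _ rest.attach)
  · exact Nat.lt_succ_self _

def find_duplicates_within_batch_alt (data_rows : List (List String)) (selected_batches : List String) (batch_row_counts : List (String × Int)) : List (String × List String) :=
  (selected_batches.foldl (fun (st : PySem.Dict String (List String) × Int) (name : String) =>
    let n := (PySem.Dict.mk batch_row_counts).getD name 0
    let keys := ((PySem.List.slice data_rows (some st.2) (some (st.2 + n))).filter
        (fun r => decide (2 ≤ r.length) && (PySem.List.pyGetD r 1 "" != ""))).map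
        (fun r => PySem.List.pyGetD r 1 "")
    let dups := pvDupKeys [] keys
    (if dups ≠ [] then st.1.insert name dups else st.1, st.2 + n))
    (PySem.Dict.empty, 0)).1.items

-- ===== PRECONDITION & SPEC =====
-- Pre_ excludes exactly the inputs where a selected batch name is missing from batch_row_counts: there A raises KeyError.
def Pre_find_duplicates_within_batch (data_rows : List (List String)) (selected_batches : List String) (batch_row_counts : List (String × Int)) : Prop :=
  ∀ b ∈ selected_batches, b ∈ batch_row_counts.map Prod.fst
instance (data_rows : List (List String)) (selected_batches : List String) (batch_row_counts : List (String × Int)) : Decidable (Pre_find_duplicates_within_batch data_rows selected_batches batch_row_counts) := by unfold Pre_find_duplicates_within_batch; infer_instance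
def pvWitness_find_duplicates_within_batch : List (List String) × List String × (List (String × Int)) :=
  ([["a", "k"], ["b", "k"], ["c", "m"]], ["B1"], [("B1", 3)])

def Spec_find_duplicates_within_batch (data_rows : List (List String)) (selected_batches : List String) (batch_row_counts : List (String × Int)) (out : List (String × List String)) : Prop := out = find_duplicates_within_batch_alt data_rows selected_batches batch_row_counts
instance (data_rows : List (List String)) (selected_batches : List String) (batch_row_counts : List (String × Int)) (out : List (String × List String)) : Decidable (Spec_find_duplicates_within_batch data_rows selected_batches batch_row_counts out) := by unfold Spec_find_duplicates_within_batch; infer_instance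

-- ===== CLAIM (what is proved, stated in full; the proofs are below) =====
def Claim_equal_find_duplicates_within_batch : Prop := ∀ (data_rows : List (List String)) (selected_batches : List String) (batch_row_counts : List (String × Int)), Dom_find_duplicates_within_batch data_rows selected_batches batch_row_counts → Pre_find_duplicates_within_batch data_rows selected_batches batch_row_counts → Spec_find_duplicates_within_batch data_rows selected_batches batch_row_counts (find_duplicates_within_batch data_rows selected_batches batch_row_counts)

-- ===== LEMMAS AND PROOFS =====

-- A's guarded counting fold over rows equals the plain counting fold over the extracted key list.
theorem countFold_eq_keys (rows : List (List String)) (d : PySem.Dict String Int) :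
    rows.foldl (fun (d : PySem.Dict String Int) row =>
        if 2 ≤ row.length then
          let key := PySem.List.pyGetD row 1 ""
          if key ≠ "" then d.insert key (d.getD key 0 + 1) else d
        else d) d
    = ((rows.filter (fun r => decide (2 ≤ r.length) && (PySem.List.pyGetD r 1 "" != ""))).map
        (fun r => PySem.List.pyGetD r 1 "")).foldl (fun d x => d.insert x (d.getD x 0 + 1)) d := by
  induction rows generalizing d with
  | nil => rfl
  | cons r rs ih =>
    have step : (if 2 ≤ r.length then
          let key := PySem.List.pyGetD r 1 ""
          if key ≠ "" then d.insert key (d.getD key 0 + 1) else d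
        else d)
        = (if (decide (2 ≤ r.length) && (PySem.List.pyGetD r 1 "" != "")) = true
           then d.insert (PySem.List.pyGetD r 1 "") (d.getD (PySem.List.pyGetD r 1 "") 0 + 1)
           else d) := by
      by_cases h1 : 2 ≤ r.length <;> by_cases h2 : PySem.List.pyGetD r 1 "" = "" <;> simp [h1, h2]
    rw [List.foldl_cons, step, List.filter_cons]
    cases hb : (decide (2 ≤ r.length) && (PySem.List.pyGetD r 1 "" != "")) with
    | false =>
      simp only [Bool.false_eq_true, if_false]
      exact ih _
    | true =>
      simp only [if_true, List.map_cons, List.foldl_cons]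
      exact ih _

-- folding Set.add is unchanged by removing copies of an element already in the accumulator
theorem foldl_add_mem_filter {α : Type} [BEq α] [LawfulBEq α] (k : α) (xs : List α) :
    ∀ s : List α, k ∈ s →
      xs.foldl PySem.Set.add s = (xs.filter (fun x => !(x == k))).foldl PySem.Set.add s := by
  induction xs with
  | nil => intro s _; rfl
  | cons x xs ih =>
    intro s hk
    by_cases hx : x = k
    · subst hx
      have : PySem.Set.add s x = s := PySem.Set.add_of_mem hk
      simp [List.foldl_cons, this, ih s hk]
    · have hxk : (x == k) = false := by simp [hx]
      have hk' : k ∈ PySem.Set.add s x := by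
        simp [PySem.Set.add]; split_ifs <;> simp [hk]
      simp [List.foldl_cons, hxk, ih _ hk']

-- folding Set.add over elements all ≠ k commutes with a leading k in the accumulator
theorem foldl_add_cons_not_mem {α : Type} [BEq α] [LawfulBEq α] (k : α) (ys : List α) :
    ∀ s : List α, (∀ y ∈ ys, (y == k) = false) →
      ys.foldl PySem.Set.add (k :: s) = k :: ys.foldl PySem.Set.add s := by
  induction ys with
  | nil => intro s _; rfl
  | cons y ys ih =>
    intro s h
    have hyk : (y == k) = false := h y (List.mem_cons_self ..)
    have hc : (k :: s).contains y = s.contains y := by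
      simp [hyk]
    have hadd : PySem.Set.add (k :: s) y = k :: PySem.Set.add s y := by
      simp only [PySem.Set.add, PySem.Set.contains, hc]
      split_ifs <;> simp
    rw [List.foldl_cons, hadd, List.foldl_cons,
      ih _ (fun z hz => h z (List.mem_cons_of_mem _ hz))]

-- first-occurrence dedup of a cons: head, then dedup of the tail with copies of the head removed
theorem dedup_cons {α : Type} [BEq α] [LawfulBEq α] (k : α) (rest : List α) :
    PySem.List.dedup (k :: rest) = k :: PySem.List.dedup (rest.filter (fun x => !(x == k))) := by
  simp only [PySem.List.dedup_eq_ofList, PySem.Set.ofList, List.foldl_cons]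
  have h0 : PySem.Set.add PySem.Set.empty k = [k] := by rfl
  rw [h0, foldl_add_mem_filter k rest [k] (List.mem_singleton.mpr rfl)]
  rw [foldl_add_cons_not_mem k _ [] (fun y hy => by
    have := List.of_mem_filter hy; simpa using this)]
  rfl

-- B's extraction loop equals (ordered dedup) filtered by (count > 1), with accumulator prefix
theorem dupKeys_eq : ∀ (dups keys : List String),
    pvDupKeys dups keys
      = dups ++ (PySem.List.dedup keys).filter (fun k => decide (1 < PySem.List.count keys k)) := by
  intro dups keys
  induction dups, keys using pvDupKeys.induct with
  | case1 dups => simp [pvDupKeys]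
  | case2 dups k rest hmem ih =>
    have ih' : pvDupKeys (dups ++ [k]) (rest.filter (fun x => !(x == k)))
        = (dups ++ [k]) ++ (PySem.List.dedup (rest.filter (fun x => !(x == k)))).filter
            (fun x => decide (1 < PySem.List.count (rest.filter (fun x => !(x == k))) x)) := by
      have h := ih
      simp only [List.unattach_filter, List.unattach_attach] at h
      exact h
    have hk : k ∈ rest := by simpa using hmem
    rw [pvDupKeys, if_pos hmem, ih', dedup_cons, List.filter_cons]
    have hck : decide (1 < PySem.List.count (k :: rest) k) = true := by
      have : 0 < List.count k rest := List.count_pos_iff.mpr hk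
      simp [PySem.List.count]
      omega
    rw [hck, if_pos rfl]
    have hcong : (PySem.List.dedup (rest.filter (fun x => !(x == k)))).filter
          (fun x => decide (1 < PySem.List.count (k :: rest) x))
        = (PySem.List.dedup (rest.filter (fun x => !(x == k)))).filter
          (fun x => decide (1 < PySem.List.count (rest.filter (fun x => !(x == k))) x)) := by
      apply List.filter_congr
      intro x hx
      have hxf : x ∈ rest.filter (fun x => !(x == k)) := by
        simpa [PySem.List.mem_dedup] using hx
      have hxk : (x == k) = false := by simpa using List.of_mem_filter hxf
      have hxk' : x ≠ k := by simpa using hxk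
      have h1 : List.count x (k :: rest) = List.count x rest := by
        simp [List.count_cons]
        exact fun h => hxk' h.symm
      have h2 : List.count x (rest.filter (fun x => !(x == k))) = List.count x rest := by
        rw [List.count_filter]; simp [hxk]
      simp [PySem.List.count, h1, h2]
    rw [hcong]
    simp
  | case3 dups k rest hmem ih =>
    have hk : k ∉ rest := by simpa using hmem
    rw [pvDupKeys, if_neg (by simpa using hmem), ih, dedup_cons, List.filter_cons]
    have hfe : rest.filter (fun x => !(x == k)) = rest :=
      List.filter_eq_self.mpr (fun x hx => by
        simp only [Bool.not_eq_eq_eq_not, Bool.not_true, beq_eq_false_iff_ne]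
        exact fun h => hk (h ▸ hx))
    have hck : decide (1 < PySem.List.count (k :: rest) k) = false := by
      have : List.count k rest = 0 := List.count_eq_zero.mpr hk
      simp [PySem.List.count, this]
    rw [hfe, hck]
    simp only [Bool.false_eq_true, if_false]
    congr 1
    apply List.filter_congr
    intro x hx
    have hxr : x ∈ rest := by simpa [PySem.List.mem_dedup] using hx
    have hxk : x ≠ k := fun h => hk (h ▸ hxr)
    have h1 : List.count x (k :: rest) = List.count x rest := by
      simp [List.count_cons]
      exact fun h => hxk h.symm
    simp [PySem.List.count, h1]

-- per-batch core: A's items-of-counter filter equals B's extraction loop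
theorem inner_eq (keys : List String) :
    (((keys.foldl (fun (d : PySem.Dict String Int) x => d.insert x (d.getD x 0 + 1)) PySem.Dict.empty).items.filter
        (fun p => 1 < p.2)).map Prod.fst)
    = pvDupKeys [] keys := by
  rw [PySem.Dict.foldl_insert_getD_add_one_eq_counter, PySem.Dict.items_counter,
    dupKeys_eq [] keys, List.nil_append, ← PySem.List.dedup_eq_ofList, List.filter_map,
    List.map_map]
  have : ∀ k : String, (decide (1 < ((List.count k keys : Nat) : Int))) = decide (1 < PySem.List.count keys k) := by
    intro k
    simp [PySem.List.count]
  simp only [Function.comp_def, this]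
  simp

-- ===== VERDICT (by name: the statement is the Claim_ definition above) =====
theorem find_duplicates_within_batch_spec : Claim_equal_find_duplicates_within_batch := by
  intro data_rows selected_batches batch_row_counts _ _
  unfold Spec_find_duplicates_within_batch find_duplicates_within_batch find_duplicates_within_batch_alt
  congr 2
  apply List.foldl_ext
  intro st name _
  simp only [countFold_eq_keys, inner_eq]
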